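-- pv_equiv track=rewrite | github.com/yskang/AlgorithmPractice | baekjoon/python/binary_tree_13325.py | solution
-- ===== SOURCE A (Python) =====
-- def solution(k: int, ns: list):
--     s = 0
--     ps = [(0, 2)]
--     for i in range(1, k):
--         s += 2**i
--         ps.append((s, 2**(i+1)))
--
--
--     total = 0
--
--     prevs = [0] * 2**k
--     for p in reversed(ps):
--
--         for i in range(p[0], p[0]+p[1]):
--             total += ns[i]
--             ns[i] += prevs[i-p[0]]
--
--
--         prevs = []
--         for i in range(p[0], p[0]+p[1], 2):
--             prevs.append(max(ns[i], ns[i+1]))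
--             total += abs(ns[i] - ns[i+1])
--
--     return total
-- ===== SOURCE B (Python) =====
-- def solution(k: int, ns: list):
--     # Top-down recursion over the complete binary tree stored in ns
--     # (node at level l, position j lives at index 2**l - 2 + j).
--     # Like the original, mutates ns in place: each internal node becomes
--     # weight + max(balanced children).
--     total = 0
--
--     def go(l, j):
--         nonlocal total
--         i = 2 ** l - 2 + j
--         v = ns[i]
--         if l == k:
--             total += v
--             return v
--         left = go(l + 1, 2 * j)
--         right = go(l + 1, 2 * j + 1)
--         total += v + abs(left - right)
--         ns[i] = v + max(left, right)
--         return ns[i]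
--
--     left = go(1, 0)
--     right = go(1, 1)
--     return total + abs(left - right)
-- ===== Notes on version B (the rewrite author's own statement) =====
-- stated objective: alternative
-- what changed: Replaces the iterative deepest-level-first sweep with per-level offset table ps and carried prevs arrays by a single top-down recursion over the tree that returns each subtree's balanced root edge value and accumulates weights and |left-right| differences on the way back up (same in-place mutation of ns).
import Mathlib
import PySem

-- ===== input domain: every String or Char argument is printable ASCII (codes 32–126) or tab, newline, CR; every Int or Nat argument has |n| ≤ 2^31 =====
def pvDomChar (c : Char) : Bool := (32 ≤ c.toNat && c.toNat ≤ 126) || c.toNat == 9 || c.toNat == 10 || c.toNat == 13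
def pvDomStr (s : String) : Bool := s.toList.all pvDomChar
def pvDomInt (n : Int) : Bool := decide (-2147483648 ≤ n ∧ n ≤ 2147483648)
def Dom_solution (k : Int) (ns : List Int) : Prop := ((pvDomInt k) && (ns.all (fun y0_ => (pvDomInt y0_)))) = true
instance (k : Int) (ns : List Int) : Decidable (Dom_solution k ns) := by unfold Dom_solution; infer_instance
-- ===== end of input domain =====

-- B replaces A's iterative level-by-level sweep (offset table + prevs arrays) by a top-down
-- recursion over the tree; equal return value (both also mutate ns identically in Python).

-- ===== PORT A =====
-- builds ps: Python 's += 2**i; ps.append((s, 2**(i+1)))'; 2**i is ported as 2 ^ i.toNat,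
-- exact for the i ≥ 1 that range(1, k) yields
def psStepA (acc : Int × List (Int × Int)) (i : Int) : Int × List (Int × Int) :=
  (acc.1 + 2 ^ i.toNat, acc.2 ++ [(acc.1 + 2 ^ i.toNat, 2 ^ (i.toNat + 1))])

-- the body of 'for p in reversed(ps)': state is (ns, prevs, total)
def levelStepA (st : List Int × List Int × Int) (p : Int × Int) : List Int × List Int × Int :=
  -- for i in range(p[0], p[0]+p[1]): total += ns[i]; ns[i] += prevs[i-p[0]]
  let st1 := (PySem.List.pyRange p.1 (p.1 + p.2)).foldl
    (fun (ac : List Int × Int) i =>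
      (PySem.List.pySetD ac.1 i
         (PySem.List.pyGetD ac.1 i 0 + PySem.List.pyGetD st.2.1 (i - p.1) 0),
       ac.2 + PySem.List.pyGetD ac.1 i 0))
    (st.1, st.2.2)
  -- prevs = []; for i in range(p[0], p[0]+p[1], 2): prevs.append(max(ns[i], ns[i+1])); total += abs(ns[i]-ns[i+1])
  let st2 := (PySem.List.pyRange p.1 (p.1 + p.2) 2).foldl
    (fun (ac : List Int × Int) i =>
      (ac.1 ++ [max (PySem.List.pyGetD st1.1 i 0) (PySem.List.pyGetD st1.1 (i + 1) 0)],
       ac.2 + |PySem.List.pyGetD st1.1 i 0 - PySem.List.pyGetD st1.1 (i + 1) 0|))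
    ([], st1.2)
  (st1.1, st2.1, st2.2)

def solution (k : Int) (ns : List Int) : Int :=
  let ps := ((PySem.List.pyRange 1 k).foldl psStepA (0, [(0, 2)])).2
  -- prevs = [0] * 2**k  (k ≥ 0 on Pre_; negative k raises TypeError in Python)
  let st := ps.reverse.foldl levelStepA (ns, List.replicate (2 ^ k.toNat) (0 : Int), 0)
  st.2.2

-- ===== PORT B =====
-- go(l, j) of Source B; fuel r = k - l drives the recursion (r = 0 ⟺ l == k);
-- state is (ns, total), result is (ns, total, returned edge value)
def goB : Nat → Nat → Nat → List Int × Int → List Int × Int × Int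
  | 0, l, j, st =>
    let v := st.1.getD (2 ^ l - 2 + j) 0
    (st.1, st.2 + v, v)
  | r + 1, l, j, st =>
    let i := 2 ^ l - 2 + j
    let v := st.1.getD i 0
    let resL := goB r (l + 1) (2 * j) st
    let resR := goB r (l + 1) (2 * j + 1) (resL.1, resL.2.1)
    (resR.1.set i (v + max resL.2.2 resR.2.2),
     resR.2.1 + v + |resL.2.2 - resR.2.2|,
     v + max resL.2.2 resR.2.2)

def solution_alt (k : Int) (ns : List Int) : Int :=
  let r := k.toNat - 1
  let resL := goB r 1 0 (ns, 0)
  let resR := goB r 1 1 (resL.1, resL.2.1)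
  resR.2.1 + |resL.2.2 - resR.2.2|

-- ===== PRECONDITION & SPEC =====
-- Pre_ = exactly the inputs where Python A returns: k ≥ 1 (k = 0 hits prevs[1] with a
-- 1-element prevs, k < 0 makes [0]*2**k a TypeError) and ns long enough for the full tree.
def Pre_solution (k : Int) (ns : List Int) : Prop :=
  1 ≤ k ∧ 2 ^ (k.toNat + 1) - 2 ≤ ns.length
instance (k : Int) (ns : List Int) : Decidable (Pre_solution k ns) := by
  unfold Pre_solution; infer_instance
def pvWitness_solution : Int × List Int := (1, [3, 5])

def Spec_solution (k : Int) (ns : List Int) (out : Int) : Prop := out = solution_alt k ns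
instance (k : Int) (ns : List Int) (out : Int) : Decidable (Spec_solution k ns out) := by
  unfold Spec_solution; infer_instance

-- ===== CLAIM (what is proved, stated in full; the proofs are below) =====
def Claim_equal_solution : Prop :=
  ∀ (k : Int) (ns : List Int), Dom_solution k ns → Pre_solution k ns →
    Spec_solution k ns (solution k ns)

-- ===== LEMMAS AND PROOFS =====

-- index of node (level l, position j); tree/value/cost spec used by both sides
def tIdx (l j : Nat) : Nat := 2 ^ l - 2 + j

-- g ns r l j = (balanced edge value, total cost) of the subtree rooted at (l, j), depth r below
def g (ns : List Int) : Nat → Nat → Nat → Int × Int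
  | 0, l, j => (ns.getD (tIdx l j) 0, ns.getD (tIdx l j) 0)
  | r + 1, l, j =>
    let v := ns.getD (tIdx l j) 0
    let L := g ns r (l + 1) (2 * j)
    let R := g ns r (l + 1) (2 * j + 1)
    (v + max L.1 R.1, v + L.2 + R.2 + |L.1 - R.1|)

-- the amount A adds to node (l, j) from below (prevs value)
def pvF (ns : List Int) : Nat → Nat → Nat → Int
  | 0, _, _ => 0
  | r + 1, l, j => max (g ns r (l + 1) (2 * j)).1 (g ns r (l + 1) (2 * j + 1)).1

lemma g_fst (ns : List Int) (r l j : Nat) :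
    (g ns r l j).1 = ns.getD (tIdx l j) 0 + pvF ns r l j := by
  cases r <;> simp [g, pvF]

-- membership of index i in the subtree rooted at (l, j) of depth r
def InT (r l j i : Nat) : Prop :=
  ∃ d, d ≤ r ∧ 2 ^ (l + d) - 2 + j * 2 ^ d ≤ i ∧ i < 2 ^ (l + d) - 2 + (j + 1) * 2 ^ d

lemma InT_self (r l j : Nat) : InT r l j (tIdx l j) := by
  exact ⟨0, Nat.zero_le _, by simp [tIdx], by simp [tIdx]⟩

lemma InT_child (r l j b i : Nat) (hb : b ≤ 1) (h : InT r (l + 1) (2 * j + b) i) :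
    InT (r + 1) l j i := by
  obtain ⟨d, hd, h1, h2⟩ := h
  refine ⟨d + 1, by omega, ?_, ?_⟩
  · have : l + 1 + d = l + (d + 1) := by omega
    rw [this] at h1
    have : j * 2 ^ (d + 1) ≤ (2 * j + b) * 2 ^ d := by
      rw [pow_succ]; nlinarith [pow_pos (by norm_num : (0:ℕ) < 2) d]
    omega
  · have he : l + 1 + d = l + (d + 1) := by omega
    rw [he] at h2
    have : (2 * j + b + 1) * 2 ^ d ≤ (j + 1) * 2 ^ (d + 1) := by
      rw [pow_succ]; nlinarith [pow_pos (by norm_num : (0:ℕ) < 2) d]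
    omega

-- indices of the two child subtrees are disjoint
lemma InT_sibling_disjoint (r l j i : Nat) (hj : j < 2 ^ l)
    (hL : InT r (l + 1) (2 * j) i) (hR : InT r (l + 1) (2 * j + 1) i) : False := by
  obtain ⟨d, hd, h1, h2⟩ := hL
  obtain ⟨d', hd', h1', h2'⟩ := hR
  rcases Nat.lt_trichotomy d d' with h | h | h
  · -- i < level-(l+1+d) block end ≤ level-(l+1+d') block start
    have hb : (2 * j + 1) * 2 ^ d ≤ 2 ^ (l + 1 + d) := by
      calc (2 * j + 1) * 2 ^ d ≤ 2 ^ (l + 1) * 2 ^ d := Nat.mul_le_mul_right _ (by omega)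
        _ = 2 ^ (l + 1 + d) := (pow_add 2 (l + 1) d).symm
    have hm : 2 ^ (l + 1 + d) + 2 ^ (l + 1 + d) ≤ 2 ^ (l + 1 + d') := by
      have : 2 ^ (l + 1 + d + 1) ≤ 2 ^ (l + 1 + d') := Nat.pow_le_pow_right (by norm_num) (by omega)
      rw [pow_succ] at this; omega
    have hg : 2 ≤ 2 ^ (l + 1 + d) := by
      have := Nat.pow_le_pow_right (by norm_num : 1 ≤ 2) (by omega : 1 ≤ l + 1 + d)
      simpa using this
    omega
  · subst h
    have : (2 * j + 1) * 2 ^ d = (2 * j) * 2 ^ d + 2 ^ d := by ring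
    have h2d : (2 * j + 1 + 1) * 2 ^ d = (2 * j + 1) * 2 ^ d + 2 ^ d := by ring
    omega
  · have hb : (2 * j + 1 + 1) * 2 ^ d' ≤ 2 ^ (l + 1 + d') := by
      calc (2 * j + 1 + 1) * 2 ^ d' ≤ 2 ^ (l + 1) * 2 ^ d' := Nat.mul_le_mul_right _ (by omega)
        _ = 2 ^ (l + 1 + d') := (pow_add 2 (l + 1) d').symm
    have hm : 2 ^ (l + 1 + d') + 2 ^ (l + 1 + d') ≤ 2 ^ (l + 1 + d) := by
      have : 2 ^ (l + 1 + d' + 1) ≤ 2 ^ (l + 1 + d) := Nat.pow_le_pow_right (by norm_num) (by omega)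
      rw [pow_succ] at this; omega
    have hg : 2 ≤ 2 ^ (l + 1 + d') := by
      have := Nat.pow_le_pow_right (by norm_num : 1 ≤ 2) (by omega : 1 ≤ l + 1 + d')
      simpa using this
    omega

lemma getD_set_ne (xs : List Int) (n m : Nat) (v : Int) (h : m ≠ n) :
    (xs.set n v).getD m 0 = xs.getD m 0 := by
  simp [List.getD_eq_getElem?_getD, List.getElem?_set_ne (by omega : n ≠ m)]

lemma getD_set_self (xs : List Int) (n : Nat) (v : Int) (h : n < xs.length) :
    (xs.set n v).getD n 0 = v := by
  simp [List.getD_eq_getElem?_getD, h]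

-- B's recursion computes g on any list agreeing with ns on the subtree, and only
-- changes subtree indices
lemma goB_spec (ns : List Int) : ∀ (r l j : Nat) (ms : List Int) (t : Int),
    j < 2 ^ l →
    (∀ i, InT r l j i → ms.getD i 0 = ns.getD i 0) →
    (goB r l j (ms, t)).2.1 = t + (g ns r l j).2 ∧
    (goB r l j (ms, t)).2.2 = (g ns r l j).1 ∧
    (∀ i, ¬ InT r l j i → (goB r l j (ms, t)).1.getD i 0 = ms.getD i 0) ∧
    (goB r l j (ms, t)).1.length = ms.length := by
  intro r
  induction r with
  | zero =>
    intro l j ms t hj hagree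
    have hv : ms.getD (2 ^ l - 2 + j) 0 = ns.getD (2 ^ l - 2 + j) 0 := by
      simpa [tIdx] using hagree _ (InT_self 0 l j)
    simp only [goB, g, tIdx]
    refine ⟨by rw [hv], by rw [hv], fun i _ => trivial, trivial⟩
  | succ r ih =>
    intro l j ms t hj hagree
    have hjl : 2 * j < 2 ^ (l + 1) := by rw [pow_succ]; omega
    have hjr : 2 * j + 1 < 2 ^ (l + 1) := by rw [pow_succ]; omega
    have hv : ms.getD (2 ^ l - 2 + j) 0 = ns.getD (2 ^ l - 2 + j) 0 :=
      hagree _ (by simpa [tIdx] using InT_self (r + 1) l j)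
    have hL := ih (l + 1) (2 * j) ms t hjl
      (fun i hi => hagree i (InT_child r l j 0 i (by norm_num) (by simpa using hi)))
    obtain ⟨hLt, hLv, hLoff, hLlen⟩ := hL
    have hagreeR : ∀ i, InT r (l + 1) (2 * j + 1) i →
        (goB r (l + 1) (2 * j) (ms, t)).1.getD i 0 = ns.getD i 0 := by
      intro i hi
      rw [hLoff i (fun hcon => InT_sibling_disjoint r l j i hj (by simpa using hcon) hi)]
      exact hagree i (InT_child r l j 1 i le_rfl hi)
    have hR := ih (l + 1) (2 * j + 1) (goB r (l + 1) (2 * j) (ms, t)).1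
      (goB r (l + 1) (2 * j) (ms, t)).2.1 hjr hagreeR
    obtain ⟨hRt, hRv, hRoff, hRlen⟩ := hR
    rw [hLt] at hRt hRv hRoff hRlen
    simp only [goB, g, tIdx]
    refine ⟨?_, ?_, ?_, ?_⟩
    · rw [hLt, hRt, hLv, hRv, hv]; ring
    · rw [hLt, hLv, hRv, hv]
    · intro i hi
      have hne : i ≠ 2 ^ l - 2 + j := by
        intro h; exact hi (h ▸ by simpa [tIdx] using InT_self (r + 1) l j)
      rw [hLt, getD_set_ne _ _ _ _ hne,
        hRoff i (fun hc => hi (InT_child r l j 1 i le_rfl hc)),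
        hLoff i (fun hc => hi (InT_child r l j 0 i (by norm_num) (by simpa using hc)))]
    · rw [hLt, List.length_set, hRlen, hLlen]

lemma solution_alt_eq (k : Int) (ns : List Int) :
    solution_alt k ns =
      (g ns (k.toNat - 1) 1 0).2 + (g ns (k.toNat - 1) 1 1).2 +
        |(g ns (k.toNat - 1) 1 0).1 - (g ns (k.toNat - 1) 1 1).1| := by
  obtain ⟨hLt, hLv, hLoff, -⟩ :=
    goB_spec ns (k.toNat - 1) 1 0 ns 0 (by norm_num) (fun i _ => rfl)
  have hdis : ∀ i, InT (k.toNat - 1) 1 1 i →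
      (goB (k.toNat - 1) 1 0 (ns, 0)).1.getD i 0 = ns.getD i 0 := by
    intro i hi
    exact hLoff i (fun hc => InT_sibling_disjoint (k.toNat - 1) 0 0 i (by norm_num)
      (by simpa using hc) (by simpa using hi))
  obtain ⟨hRt, hRv, -, -⟩ := goB_spec ns (k.toNat - 1) 1 1 _ _ (by norm_num) hdis
  simp only [solution_alt]
  rw [hRt, hRv, hLt, hLv]
  ring

-- ===== A-side =====

-- total "already accumulated" before processing level l
def TT (ns : List Int) (k' l : Nat) : Int :=
  (((List.range (2 ^ l)).map (fun j => (g ns (k' - l) l j).2 - ns.getD (tIdx l j) 0))).sum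

def InvA (ns : List Int) (k' l : Nat) (st : List Int × List Int × Int) : Prop :=
  st.1.length = ns.length ∧
  (∀ i, i < 2 ^ (l + 1) - 2 → st.1.getD i 0 = ns.getD i 0) ∧
  (∀ j, j < 2 ^ l → st.2.1.getD j 0 = pvF ns (k' - l) l j) ∧
  st.2.2 = TT ns k' l

lemma ps_closed (k' : Nat) (hk : 1 ≤ k') :
    (PySem.List.pyRange 1 (k' : Int)).foldl psStepA (0, [(0, 2)]) =
      ((2 : Int) ^ k' - 2,
       (List.range k').map (fun m => ((2 : Int) ^ (m + 1) - 2, (2 : Int) ^ (m + 1)))) := by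
  induction k', hk using Nat.le_induction with
  | base =>
    have h1 : PySem.List.pyRange 1 ((1 : Nat) : Int) = [] := by
      rw [PySem.List.pyRange_of_pos _ _ (by norm_num)]
      norm_num
    rw [h1]
    norm_num
  | succ n hn ih =>
    have hcast : ((n + 1 : Nat) : Int) = (n : Int) + 1 := by push_cast; ring
    have hle : (1 : Int) ≤ (n : Int) := by exact_mod_cast hn
    rw [hcast, PySem.List.pyRange_one_succ_right hle, List.foldl_append, ih]
    simp only [List.foldl, psStepA, Int.toNat_natCast]
    have hpow : (2 : Int) ^ n - 2 + 2 ^ n = 2 ^ (n + 1) - 2 := by rw [pow_succ]; ring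
    rw [List.range_succ, List.map_append]
    simp [hpow]

lemma loop1_char (prevs : List Int) : ∀ (c a : Nat) (ms : List Int) (t : Int),
    a + c ≤ ms.length →
    (let res := (PySem.List.pyRange (a : Int) ((a : Int) + (c : Int))).foldl
      (fun (ac : List Int × Int) i =>
        (PySem.List.pySetD ac.1 i
           (PySem.List.pyGetD ac.1 i 0 + PySem.List.pyGetD prevs (i - (a : Int)) 0),
         ac.2 + PySem.List.pyGetD ac.1 i 0)) (ms, t)
     res.1.length = ms.length ∧
     (∀ idx, res.1.getD idx 0 =
        if a ≤ idx ∧ idx < a + c then ms.getD idx 0 + prevs.getD (idx - a) 0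
        else ms.getD idx 0) ∧
     res.2 = t + ((List.range c).map (fun j => ms.getD (a + j) 0)).sum) := by
  intro c
  induction c with
  | zero =>
    intro a ms t h
    have h0 : PySem.List.pyRange (a : Int) ((a : Int) + ((0 : Nat) : Int)) = [] := by
      rw [PySem.List.pyRange_of_pos _ _ (by norm_num)]; norm_num
    dsimp only
    rw [h0]
    refine ⟨rfl, ?_, by simp⟩
    intro idx
    split_ifs with hcond
    · omega
    · rfl
  | succ c ih =>
    intro a ms t h
    obtain ⟨ihlen, ihget, ihsum⟩ := ih a ms t (by omega)
    dsimp only at *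
    have hstep : ((a : Int) + ((c + 1 : Nat) : Int)) = ((a : Int) + ((c : Nat) : Int)) + 1 := by
      push_cast; ring
    rw [hstep, PySem.List.pyRange_one_succ_right (by omega), List.foldl_append]
    set R := (PySem.List.pyRange (a : Int) ((a : Int) + ((c : Nat) : Int))).foldl
      (fun (ac : List Int × Int) i =>
        (PySem.List.pySetD ac.1 i
           (PySem.List.pyGetD ac.1 i 0 + PySem.List.pyGetD prevs (i - (a : Int)) 0),
         ac.2 + PySem.List.pyGetD ac.1 i 0)) (ms, t) with hRdef
    have hx : (a : Int) + ((c : Nat) : Int) = (((a + c : Nat)) : Int) := by push_cast; ring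
    have hsub : (((a + c : Nat)) : Int) - (a : Int) = ((c : Nat) : Int) := by push_cast; ring
    have hlt : a + c < R.1.length := by rw [ihlen]; omega
    simp only [List.foldl, hx, hsub, PySem.List.pyGetD_natCast, PySem.List.pySetD_natCast]
    refine ⟨by rw [List.length_set, ihlen], ?_, ?_⟩
    · intro idx
      rcases eq_or_ne idx (a + c) with hidx | hidx
      · subst hidx
        rw [getD_set_self _ _ _ hlt, ihget (a + c)]
        have hnot : ¬ (a ≤ a + c ∧ a + c < a + c) := by omega
        rw [if_neg hnot, if_pos (by omega : a ≤ a + c ∧ a + c < a + (c + 1))]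
        simp
      · rw [getD_set_ne _ _ _ _ hidx, ihget idx]
        by_cases hin : a ≤ idx ∧ idx < a + c
        · rw [if_pos hin, if_pos (by omega : a ≤ idx ∧ idx < a + (c + 1))]
        · rw [if_neg hin, if_neg (by omega : ¬ (a ≤ idx ∧ idx < a + (c + 1)))]
    · rw [ihsum, ihget (a + c), if_neg (by omega : ¬ (a ≤ a + c ∧ a + c < a + c)),
        List.range_succ, List.map_append]
      simp [add_assoc]

lemma pyRange_two_closed (a h : Nat) :
    PySem.List.pyRange (a : Int) ((a : Int) + ((2 * h : Nat) : Int)) 2 =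
      (List.range h).map (fun j => ((a + 2 * j : Nat) : Int)) := by
  rw [PySem.List.pyRange_of_pos _ _ (by norm_num : (0 : Int) < 2)]
  rcases Nat.eq_zero_or_pos h with h0 | hpos
  · subst h0; norm_num
  · have hlt : (a : Int) < (a : Int) + ((2 * h : Nat) : Int) := by push_cast; omega
    have hdiv : ((a : Int) + ((2 * h : Nat) : Int) - (a : Int) + 2 - 1) / 2 = (h : Int) := by
      push_cast; omega
    rw [if_pos hlt, hdiv, Int.toNat_natCast]
    exact List.map_congr_left (fun k _ => by push_cast; ring)

lemma loop2_char (ws : List Int) : ∀ (h a : Nat) (acc : List Int) (t : Int),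
    (let res := ((List.range h).map (fun j => ((a + 2 * j : Nat) : Int))).foldl
      (fun (ac : List Int × Int) i =>
        (ac.1 ++ [max (PySem.List.pyGetD ws i 0) (PySem.List.pyGetD ws (i + 1) 0)],
         ac.2 + |PySem.List.pyGetD ws i 0 - PySem.List.pyGetD ws (i + 1) 0|)) (acc, t)
     res.1 = acc ++ (List.range h).map
        (fun j => max (ws.getD (a + 2 * j) 0) (ws.getD (a + 2 * j + 1) 0)) ∧
     res.2 = t + ((List.range h).map
        (fun j => |ws.getD (a + 2 * j) 0 - ws.getD (a + 2 * j + 1) 0|)).sum) := by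
  intro h
  induction h with
  | zero => intro a acc t; simp
  | succ h ih =>
    intro a acc t
    obtain ⟨ih1, ih2⟩ := ih a acc t
    dsimp only at *
    have hone : ((a + 2 * h : Nat) : Int) + 1 = ((a + 2 * h + 1 : Nat) : Int) := by push_cast; ring
    rw [List.range_succ, List.map_append, List.foldl_append]
    simp only [List.map_cons, List.map_nil, List.foldl_cons, List.foldl_nil,
      List.map_append, List.sum_append, ih1, ih2, hone, PySem.List.pyGetD_natCast]
    exact ⟨by rw [List.append_assoc], by simp [add_assoc]⟩

lemma sum2 (h : Nat) (f : Nat → Int) :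
    ((List.range (2 * h)).map f).sum =
      ((List.range h).map (fun j => f (2 * j) + f (2 * j + 1))).sum := by
  induction h with
  | zero => simp
  | succ h ih =>
    have h2 : 2 * (h + 1) = 2 * h + 1 + 1 := by ring
    rw [h2, List.range_succ, List.range_succ, List.range_succ]
    simp only [List.map_append, List.sum_append, ih]
    simp [add_assoc]

lemma step_lemma (ns : List Int) (k' l : Nat) (hl : 1 ≤ l) (hlk : l ≤ k')
    (hns : 2 ^ (k' + 1) - 2 ≤ ns.length) (st : List Int × List Int × Int)
    (hInvA : InvA ns k' l st) :
    InvA ns k' (l - 1) (levelStepA st ((2 : Int) ^ l - 2, (2 : Int) ^ l)) := by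
  obtain ⟨hlen, hms, hprev, htot⟩ := hInvA
  have h2l : (2 : Nat) ≤ 2 ^ l := by
    have := Nat.pow_le_pow_right (by norm_num : 1 ≤ 2) hl
    simpa using this
  have hpows : (2 : Nat) ^ l = 2 * 2 ^ (l - 1) := by
    conv_lhs => rw [show l = (l - 1) + 1 by omega]
    rw [pow_succ]; ring
  have hpow1 : (2 : Nat) ^ (l + 1) = 2 ^ l * 2 := pow_succ 2 l
  have hca : (((2 ^ l - 2 : Nat)) : Int) = (2 : Int) ^ l - 2 := by
    rw [Nat.cast_sub h2l]; push_cast; ring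
  have hcc : (((2 ^ l : Nat)) : Int) = (2 : Int) ^ l := by push_cast; ring
  have hlen1 : 2 ^ l - 2 + 2 ^ l ≤ st.1.length := by
    rw [hlen]
    have hm : 2 ^ (l + 1) ≤ 2 ^ (k' + 1) := Nat.pow_le_pow_right (by norm_num) (by omega)
    omega
  obtain ⟨L1len, L1get, L1sum⟩ := loop1_char st.2.1 (2 ^ l) (2 ^ l - 2) st.1 st.2.2 hlen1
  have hr2 : PySem.List.pyRange ((2 ^ l - 2 : Nat) : Int)
      (((2 ^ l - 2 : Nat) : Int) + ((2 ^ l : Nat) : Int)) 2 =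
      (List.range (2 ^ (l - 1))).map (fun j => ((2 ^ l - 2 + 2 * j : Nat) : Int)) := by
    have hc2 : ((2 ^ l : Nat) : Int) = ((2 * 2 ^ (l - 1) : Nat) : Int) := by rw [hpows]
    rw [hc2]
    exact pyRange_two_closed (2 ^ l - 2) (2 ^ (l - 1))
  simp only [levelStepA]
  rw [← hca, ← hcc, hr2]
  obtain ⟨L2list, L2sum⟩ := loop2_char
    ((PySem.List.pyRange ((2 ^ l - 2 : Nat) : Int)
        (((2 ^ l - 2 : Nat) : Int) + ((2 ^ l : Nat) : Int))).foldl
      (fun (ac : List Int × Int) i =>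
        (PySem.List.pySetD ac.1 i
           (PySem.List.pyGetD ac.1 i 0 + PySem.List.pyGetD st.2.1 (i - ((2 ^ l - 2 : Nat) : Int)) 0),
         ac.2 + PySem.List.pyGetD ac.1 i 0)) (st.1, st.2.2)).1
    (2 ^ (l - 1)) (2 ^ l - 2) [] _
  -- abbreviate the loop1 result
  set R1 := (PySem.List.pyRange ((2 ^ l - 2 : Nat) : Int)
        (((2 ^ l - 2 : Nat) : Int) + ((2 ^ l : Nat) : Int))).foldl
      (fun (ac : List Int × Int) i =>
        (PySem.List.pySetD ac.1 i
           (PySem.List.pyGetD ac.1 i 0 + PySem.List.pyGetD st.2.1 (i - ((2 ^ l - 2 : Nat) : Int)) 0),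
         ac.2 + PySem.List.pyGetD ac.1 i 0)) (st.1, st.2.2) with hR1
  have hRget : ∀ j, j < 2 ^ l → R1.1.getD (2 ^ l - 2 + j) 0 = (g ns (k' - l) l j).1 := by
    intro j hj
    rw [L1get (2 ^ l - 2 + j), if_pos (by omega : 2 ^ l - 2 ≤ 2 ^ l - 2 + j ∧
      2 ^ l - 2 + j < 2 ^ l - 2 + 2 ^ l)]
    have hsub : 2 ^ l - 2 + j - (2 ^ l - 2) = j := by omega
    rw [hsub, hms _ (by omega), hprev _ hj, g_fst]
    simp [tIdx]
  have e1 : k' - (l - 1) = (k' - l) + 1 := by omega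
  have e2 : l - 1 + 1 = l := by omega
  refine ⟨?_, ?_, ?_, ?_⟩
  · rw [L1len, hlen]
  · intro i hi
    rw [e2] at hi
    rw [L1get i, if_neg (by omega : ¬ (2 ^ l - 2 ≤ i ∧ i < 2 ^ l - 2 + 2 ^ l))]
    exact hms i (by omega)
  · intro j hj
    rw [L2list]
    rw [List.nil_append, PySem.List.getD_map_range _ _ _ _ hj]
    have hj2 : 2 * j < 2 ^ l := by omega
    have hj2' : 2 * j + 1 < 2 ^ l := by omega
    rw [show 2 ^ l - 2 + 2 * j + 1 = 2 ^ l - 2 + (2 * j + 1) by omega]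
    rw [hRget _ hj2, hRget _ hj2']
    rw [e1]
    simp only [pvF, e2]
  · rw [L2sum, L1sum, htot]
    have hsum1 : ((List.range (2 ^ l)).map (fun j => st.1.getD (2 ^ l - 2 + j) 0)).sum =
        ((List.range (2 ^ l)).map (fun j => ns.getD (2 ^ l - 2 + j) 0)).sum := by
      refine congrArg List.sum (List.map_congr_left ?_)
      intro j hj
      rw [List.mem_range] at hj
      exact hms _ (by omega)
    rw [hsum1]
    have hTTl : TT ns k' l + ((List.range (2 ^ l)).map (fun j => ns.getD (2 ^ l - 2 + j) 0)).sum =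
        ((List.range (2 ^ l)).map (fun j => (g ns (k' - l) l j).2)).sum := by
      unfold TT
      rw [← PySem.List.sum_map_add_int]
      refine congrArg List.sum (List.map_congr_left ?_)
      intro j hj
      simp [tIdx]
    have habs : ((List.range (2 ^ (l - 1))).map (fun j =>
        |R1.1.getD (2 ^ l - 2 + 2 * j) 0 - R1.1.getD (2 ^ l - 2 + 2 * j + 1) 0|)).sum =
        ((List.range (2 ^ (l - 1))).map (fun j =>
        |(g ns (k' - l) l (2 * j)).1 - (g ns (k' - l) l (2 * j + 1)).1|)).sum := by
      refine congrArg List.sum (List.map_congr_left ?_)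
      intro j hj
      rw [List.mem_range] at hj
      rw [show 2 ^ l - 2 + 2 * j + 1 = 2 ^ l - 2 + (2 * j + 1) by omega]
      rw [hRget _ (by omega), hRget _ (by omega)]
    rw [habs]
    have key : ((List.range (2 ^ l)).map (fun j => (g ns (k' - l) l j).2)).sum +
        ((List.range (2 ^ (l - 1))).map (fun j =>
          |(g ns (k' - l) l (2 * j)).1 - (g ns (k' - l) l (2 * j + 1)).1|)).sum =
        TT ns k' (l - 1) := by
      conv_lhs => rw [hpows, sum2]
      rw [← PySem.List.sum_map_add_int]
      unfold TT
      rw [e1]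
      refine congrArg List.sum (List.map_congr_left ?_)
      intro j hj
      simp only [g, e2, tIdx]
      ring
    linarith [key, hTTl]

lemma main_inv (ns : List Int) (k' : Nat) (hns : 2 ^ (k' + 1) - 2 ≤ ns.length) :
    ∀ m, m ≤ k' → ∀ st, InvA ns k' m st →
      InvA ns k' 0 ((((List.range m).map
        (fun m => ((2 : Int) ^ (m + 1) - 2, (2 : Int) ^ (m + 1)))).reverse).foldl
          levelStepA st) := by
  intro m
  induction m with
  | zero => intro _ st hInv; simpa using hInv
  | succ m ih =>
    intro hm st hInv
    rw [List.range_succ, List.map_append, List.reverse_append]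
    simp only [List.reverse_cons, List.reverse_nil, List.nil_append, List.map_cons,
      List.map_nil, List.singleton_append, List.foldl_cons]
    have hstep := step_lemma ns k' (m + 1) (by omega) (by omega) hns st hInv
    simp only [Nat.add_sub_cancel] at hstep
    exact ih (by omega) _ hstep

-- ===== VERDICT (by name: the statement is the Claim_ definition above) =====
theorem solution_spec : Claim_equal_solution := by
  intro k ns _ hpre
  obtain ⟨hk, hlenpre⟩ := hpre
  have hk1 : 1 ≤ k.toNat := by omega
  have hkk : k = ((k.toNat : Nat) : Int) := by omega
  unfold Spec_solution
  show solution k ns = solution_alt k ns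
  unfold solution
  rw [hkk, ps_closed k.toNat hk1]
  simp only [Int.toNat_natCast]
  have hInit : InvA ns k.toNat k.toNat
      (ns, List.replicate (2 ^ k.toNat) (0 : Int), 0) := by
    refine ⟨rfl, fun i _ => rfl, ?_, ?_⟩
    · intro j hj
      simp [List.getD_eq_getElem?_getD, hj, pvF]
    · simp [TT, g]
  have hfin := main_inv ns k.toNat hlenpre k.toNat le_rfl _ hInit
  obtain ⟨-, -, -, htot0⟩ := hfin
  rw [htot0, solution_alt_eq]
  have ek : k.toNat = (k.toNat - 1) + 1 := by omega
  rw [TT, ek]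
  simp only [pow_zero, List.range_one, List.map_cons, List.map_nil,
    List.sum_cons, List.sum_nil, g]
  norm_num [tIdx]
  ring
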